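-- pv_equiv track=rewrite | github.com/TheChickenBoy/kattis | python3/kafkaesque.py | foo
-- ===== SOURCE A (Python) =====
-- def foo(a):
--     count = 0
--     while a:
--         count+=1
--         i = 1
--         for i in range(1,len(a)):
--             if a[i-1]>a[i]:
--                 break
--             elif i == len(a)-1:
--                 i += 1
--         a = a[i:]
--     return count
-- ===== SOURCE B (Python) =====
-- def foo(a):
--     if not a:
--         return 0
--     return 1 + sum(1 for x, y in zip(a, a[1:]) if x > y)
-- ===== Notes on version B (the rewrite author's own statement) =====
-- stated objective: faster
-- what changed: Replaces the repeated slice-and-rescan loop with a single pass counting descents (adjacent pairs with x>y) and adding 1 for a nonempty list.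
import Mathlib
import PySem

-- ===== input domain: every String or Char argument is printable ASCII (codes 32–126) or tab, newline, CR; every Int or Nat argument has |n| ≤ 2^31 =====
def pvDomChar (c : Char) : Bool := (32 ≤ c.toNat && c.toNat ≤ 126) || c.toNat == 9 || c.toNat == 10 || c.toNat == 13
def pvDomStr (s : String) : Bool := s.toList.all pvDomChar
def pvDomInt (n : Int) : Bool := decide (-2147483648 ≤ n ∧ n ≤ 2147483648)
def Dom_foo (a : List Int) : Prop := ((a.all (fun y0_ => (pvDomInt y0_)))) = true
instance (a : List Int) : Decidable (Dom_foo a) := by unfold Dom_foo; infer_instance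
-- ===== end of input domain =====

-- B replaces A's quadratic slice-and-rescan loop by a single pass counting descents (+1 if nonempty); objective: faster (asymptotic).

-- ===== PORT A =====
-- A's inner 'for i in range(1, len(a))': returns the final value of the loop
-- variable i (the break index, len(a) after the 'i += 1' on the last iteration,
-- or the initial 1 when the range is empty). Indices are always in range in A,
-- so getD is exact. 'fuel' is only a structural termination guard: at the call
-- site fuel = a.length - idx, so fuel = 0 exactly when the range is exhausted.
def fooScanGo (a : List Int) : Nat → Nat → Nat
  | _, 0 => 1
  | idx, fuel + 1 =>
    if a.getD (idx - 1) 0 > a.getD idx 0 then idx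
    else if idx = a.length - 1 then idx + 1
    else fooScanGo a (idx + 1) fuel

def fooScan (a : List Int) (idx : Nat) : Nat := fooScanGo a idx (a.length - idx)

-- A's 'while a:' loop; 'a = a[i:]' is List.drop (i = fooScan a 1 ≥ 1), so each
-- iteration shortens a: fuel = a.length suffices and is only a termination guard.
def fooLoopGo : Nat → List Int → Int → Int
  | 0, _, count => count
  | fuel + 1, a, count =>
    if a.isEmpty then count
    else fooLoopGo fuel (a.drop (fooScan a 1)) (count + 1)

def foo (a : List Int) : Int := fooLoopGo a.length a 0

-- ===== PORT B =====
-- Source B: 0 for empty, else 1 + sum(1 for x, y in zip(a, a[1:]) if x > y)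
def foo_alt (a : List Int) : Int :=
  if a.isEmpty then 0
  else 1 + ((a.zip a.tail).countP (fun p => decide (p.1 > p.2)) : Int)

-- ===== PRECONDITION & SPEC =====
def Spec_foo (a : List Int) (out : Int) : Prop := out = foo_alt a
instance (a : List Int) (out : Int) : Decidable (Spec_foo a out) := by unfold Spec_foo; infer_instance

-- ===== CLAIM (what is proved, stated in full; the proofs are below) =====
def Claim_equal_foo : Prop := ∀ (a : List Int), Dom_foo a → Spec_foo a (foo a)

-- ===== LEMMAS AND PROOFS =====

-- number of descents, structurally
def Dnat : List Int → Nat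
  | [] => 0
  | [_] => 0
  | x :: y :: t => (if x > y then 1 else 0) + Dnat (y :: t)

theorem countP_eq_Dnat (a : List Int) :
    (a.zip a.tail).countP (fun p => decide (p.1 > p.2)) = Dnat a := by
  induction a with
  | nil => simp [Dnat]
  | cons x t ih =>
      cases t with
      | nil => simp [Dnat]
      | cons y s =>
          simp only [List.tail_cons] at ih
          simp only [List.tail_cons, List.zip_cons_cons, List.countP_cons, Dnat]
          rw [ih]
          by_cases hxy : x > y
          · simp [hxy]; omega
          · simp [hxy]

theorem Dnat_no_descent (a : List Int)
    (h : ∀ k, 1 ≤ k → k < a.length → ¬ (a.getD (k - 1) 0 > a.getD k 0)) :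
    Dnat a = 0 := by
  induction a with
  | nil => simp [Dnat]
  | cons x t ih =>
      cases t with
      | nil => simp [Dnat]
      | cons y s =>
          have h1 := h 1 (by omega) (by simp)
          simp at h1
          have : Dnat (y :: s) = 0 := by
            apply ih
            intro k hk hlen
            have hk2 := h (k + 1) (by omega) (by simp at hlen ⊢; omega)
            have he : k + 1 - 1 = k := by omega
            rw [he] at hk2
            have h1k : (x :: y :: s).getD (k + 1) 0 = (y :: s).getD k 0 := by
              simp
            have h2k : (x :: y :: s).getD k 0 = (y :: s).getD (k - 1) 0 := by
              obtain ⟨k', rfl⟩ : ∃ k', k = k' + 1 := ⟨k - 1, by omega⟩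
              simp
            rw [h1k, h2k] at hk2
            exact hk2
          simp [Dnat, this, h1]

theorem Dnat_split (a : List Int) (i : Nat) (h1 : 1 ≤ i) (h2 : i < a.length)
    (hd : a.getD (i - 1) 0 > a.getD i 0)
    (hn : ∀ k, 1 ≤ k → k < i → ¬ (a.getD (k - 1) 0 > a.getD k 0)) :
    Dnat a = 1 + Dnat (a.drop i) := by
  induction a generalizing i with
  | nil => simp at h2
  | cons x t ih =>
      cases t with
      | nil => simp at h2; omega
      | cons y s =>
          by_cases hi : i = 1
          · subst hi
            simp at hd
            simp [Dnat, hd]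
          · -- i ≥ 2
            have hi2 : 2 ≤ i := by omega
            have h1' := hn 1 (by omega) (by omega)
            simp at h1'
            have hshift : ∀ k, 1 ≤ k → ((x :: y :: s).getD k 0 = (y :: s).getD (k - 1) 0) := by
              intro k hk
              obtain ⟨k', rfl⟩ : ∃ k', k = k' + 1 := ⟨k - 1, by omega⟩
              simp
            have hd' : (y :: s).getD (i - 1 - 1) 0 > (y :: s).getD (i - 1) 0 := by
              have e1 := hshift (i - 1) (by omega)
              have e2 := hshift i (by omega)
              rw [e1, e2] at hd
              exact hd
            have hrec := ih (i - 1) (by omega) (by simp at h2 ⊢; omega) hd'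
              (by
                intro k hk hki
                have hk2 := hn (k + 1) (by omega) (by omega)
                have e1 := hshift (k + 1) (by omega)
                have e2 := hshift k (by omega)
                have he : k + 1 - 1 = k := by omega
                rw [he] at hk2
                rw [e2, e1] at hk2
                have he2 : k + 1 - 1 = k := by omega
                rw [he2] at hk2
                exact hk2)
            have hdrop : (x :: y :: s).drop i = (y :: s).drop (i - 1) := by
              obtain ⟨i', rfl⟩ : ∃ i', i = i' + 1 := ⟨i - 1, by omega⟩
              simp
            rw [hdrop]
            rw [show Dnat (x :: y :: s) = (if x > y then 1 else 0) + Dnat (y :: s) from rfl,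
              if_neg (show ¬ x > y by omega)]
            simpa using hrec

-- what A's inner scan returns: length (no descent from idx on) or the first descent index
theorem fooScanGo_spec (a : List Int) (fuel : Nat) : ∀ (idx : Nat),
    idx + fuel = a.length → 1 ≤ idx → idx < a.length →
    (fooScanGo a idx fuel = a.length ∧
      ∀ k, idx ≤ k → k < a.length → ¬ (a.getD (k - 1) 0 > a.getD k 0)) ∨
    (idx ≤ fooScanGo a idx fuel ∧ fooScanGo a idx fuel < a.length ∧
      a.getD (fooScanGo a idx fuel - 1) 0 > a.getD (fooScanGo a idx fuel) 0 ∧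
      ∀ k, idx ≤ k → k < fooScanGo a idx fuel → ¬ (a.getD (k - 1) 0 > a.getD k 0)) := by
  induction fuel with
  | zero => intro idx hf h1 h2; omega
  | succ fuel ih =>
      intro idx hf h1 h2
      by_cases hdes : a.getD (idx - 1) 0 > a.getD idx 0
      · right
        rw [fooScanGo, if_pos hdes]
        exact ⟨le_refl _, h2, hdes, by omega⟩
      · by_cases hlast : idx = a.length - 1
        · left
          rw [fooScanGo, if_neg hdes, if_pos hlast]
          constructor
          · omega
          · intro k hk hklen
            have : k = idx := by omega
            subst this; exact hdes
        · rw [fooScanGo, if_neg hdes, if_neg hlast]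
          have hnext : idx + 1 < a.length := by omega
          rcases ih (idx + 1) (by omega) (by omega) hnext with ⟨he, hall⟩ | ⟨hle, hlt2, hd, hall⟩
          · left
            refine ⟨he, ?_⟩
            intro k hk hklen
            by_cases hki : k = idx
            · subst hki; exact hdes
            · exact hall k (by omega) hklen
          · right
            refine ⟨by omega, hlt2, hd, ?_⟩
            intro k hk hkr
            by_cases hki : k = idx
            · subst hki; exact hdes
            · exact hall k (by omega) hkr

theorem fooScan_spec (a : List Int) (idx : Nat) (h1 : 1 ≤ idx) (h2 : idx < a.length) :
    (fooScan a idx = a.length ∧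
      ∀ k, idx ≤ k → k < a.length → ¬ (a.getD (k - 1) 0 > a.getD k 0)) ∨
    (idx ≤ fooScan a idx ∧ fooScan a idx < a.length ∧
      a.getD (fooScan a idx - 1) 0 > a.getD (fooScan a idx) 0 ∧
      ∀ k, idx ≤ k → k < fooScan a idx → ¬ (a.getD (k - 1) 0 > a.getD k 0)) :=
  fooScanGo_spec a (a.length - idx) idx (by omega) h1 h2

theorem fooLoop_eq (n : Nat) : ∀ (a : List Int), a.length ≤ n → ∀ (c : Int),
    fooLoopGo n a c = c + (if a.isEmpty then 0 else 1 + (Dnat a : Int)) := by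
  induction n with
  | zero =>
      intro a ha c
      have : a = [] := List.length_eq_zero_iff.mp (by omega)
      subst this
      rw [fooLoopGo]; simp
  | succ n ih =>
      intro a ha c
      by_cases hemp : a.isEmpty
      · rw [fooLoopGo]; simp [hemp]
      · have hne : a ≠ [] := by simpa [List.isEmpty_iff] using hemp
        have hlen : 1 ≤ a.length := List.length_pos_iff.mpr hne
        rw [fooLoopGo]; simp only [hemp, Bool.false_eq_true, ite_false]
        by_cases hone : a.length = 1
        · -- single element: scan returns 1, slice leaves []
          have hscan : fooScan a 1 = 1 := by unfold fooScan; rw [hone]; rfl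
          have hdrop : a.drop 1 = [] := by
            apply List.eq_nil_of_length_eq_zero; simp [hone]
          have hD : Dnat a = 0 := by
            obtain ⟨x, rfl⟩ : ∃ x, a = [x] := by
              cases a with
              | nil => simp at hone
              | cons x t =>
                  cases t with
                  | nil => exact ⟨x, rfl⟩
                  | cons y s => simp at hone
            simp [Dnat]
          rw [hscan, hdrop, ih [] (by simp) (c + 1)]
          simp [hD]
        · have h2 : 1 < a.length := by omega
          rcases fooScan_spec a 1 (le_refl 1) (by omega) with ⟨he, hall⟩ | ⟨hle, hlt2, hd, hall⟩
          · -- no descent: whole list is one run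
            have hdrop : a.drop (fooScan a 1) = [] := by
              apply List.eq_nil_of_length_eq_zero; simp [he]
            have hD : Dnat a = 0 := Dnat_no_descent a (fun k hk hkl => hall k hk hkl)
            rw [hdrop, ih [] (by simp) (c + 1)]
            simp [hD]
          · -- descent at r = fooScan a 1
            set r := fooScan a 1 with hr
            have hD : Dnat a = 1 + Dnat (a.drop r) :=
              Dnat_split a r hle hlt2 hd (fun k hk hkr => hall k hk hkr)
            have hdl : (a.drop r).length ≤ n := by simp; omega
            have hdne : ¬ (a.drop r).isEmpty := by
              rw [List.isEmpty_iff]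
              intro hnil
              have := congrArg List.length hnil
              simp at this
              omega
            rw [ih (a.drop r) hdl (c + 1)]
            simp [hdne, hD]
            ring

-- ===== VERDICT (by name: the statement is the Claim_ definition above) =====
theorem foo_spec : Claim_equal_foo := by
  intro a _
  unfold Spec_foo foo foo_alt
  rw [fooLoop_eq a.length a (le_refl _) 0, countP_eq_Dnat]
  simp
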